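-- pv_equiv track=rewrite | github.com/BitKnigth/Database_Cuenca | databaseHandler.py | rawToNominal
-- ===== SOURCE A (Python) =====
-- def rawToNominal(freq):
--     nomFreq = [50, 63, 80, 100, 125, 160, 200, 250, 315, 400, 500, 630, 800, 1000, 1250, 1600, 2000, 2500, 3150, 4000, 5000, 6300, 8000, 10000, 12500, 16000, 20000]
--     mappedFreq = list()
--     for f in freq:
--         distance = [(f - i)**2 for i in nomFreq]
--         index_min = distance.index(min(distance))
--         mappedFreq.append(nomFreq[index_min])
--     return mappedFreq
-- ===== SOURCE B (Python) =====
-- def rawToNominal(freq):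
--     nomFreq = [50, 63, 80, 100, 125, 160, 200, 250, 315, 400, 500, 630, 800, 1000, 1250, 1600, 2000, 2500, 3150, 4000, 5000, 6300, 8000, 10000, 12500, 16000, 20000]
--     mappedFreq = []
--     for f in freq:
--         chosen = nomFreq[-1]
--         d = 2 * f
--         for lo, hi in zip(nomFreq, nomFreq[1:]):
--             if d <= lo + hi:
--                 chosen = lo
--                 break
--         mappedFreq.append(chosen)
--     return mappedFreq
-- ===== Notes on version B (the rewrite author's own statement) =====
-- stated objective: faster
-- what changed: A builds a full squared-distance list per frequency and then takes min plus index to recover the argmin; B walks adjacent nominal pairs once and stops at the first midpoint threshold 2*f <= lo+hi (ties prefer the lower nominal), never building a distance list or computing min/index.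
import Mathlib
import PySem

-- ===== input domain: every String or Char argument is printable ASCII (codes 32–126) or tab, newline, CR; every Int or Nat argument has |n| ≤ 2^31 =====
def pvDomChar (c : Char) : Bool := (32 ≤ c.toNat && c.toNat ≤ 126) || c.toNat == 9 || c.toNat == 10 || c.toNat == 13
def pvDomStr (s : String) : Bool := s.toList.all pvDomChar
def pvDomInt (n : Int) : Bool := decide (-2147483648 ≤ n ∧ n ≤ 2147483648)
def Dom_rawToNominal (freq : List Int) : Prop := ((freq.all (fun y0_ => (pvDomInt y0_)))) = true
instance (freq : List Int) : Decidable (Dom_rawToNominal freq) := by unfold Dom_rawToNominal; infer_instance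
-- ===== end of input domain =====

-- B replaces the per-frequency build-distances / min / index argmin scan with an early-exit
-- threshold scan over adjacent nominal pairs (tie prefers the lower nominal); measured faster by a constant factor.

-- ===== PORT A =====
def nomFreqA : List Int := [50, 63, 80, 100, 125, 160, 200, 250, 315, 400, 500, 630, 800, 1000, 1250, 1600, 2000, 2500, 3150, 4000, 5000, 6300, 8000, 10000, 12500, 16000, 20000]

-- one iteration of A's loop body; the `none` branches are unreachable (nomFreqA is a nonempty
-- constant list, so Python's min/index/[] never raise here)
def mapOneA (f : Int) : Int :=
  let distance := nomFreqA.map (fun i => (f - i) ^ 2)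
  match PySem.List.min? distance (fun y => y) with
  | none => 0
  | some m =>
    match PySem.List.index? distance m with
    | none => 0
    | some k => (PySem.List.pyGet? nomFreqA (k : Int)).getD 0

def rawToNominal (freq : List Int) : List Int :=
  freq.foldl (fun acc f => acc ++ [mapOneA f]) []

-- ===== PORT B =====
def nomFreqB : List Int := [50, 63, 80, 100, 125, 160, 200, 250, 315, 400, 500, 630, 800, 1000, 1250, 1600, 2000, 2500, 3150, 4000, 5000, 6300, 8000, 10000, 12500, 16000, 20000]

-- the inner `for lo, hi in zip(...): if d <= lo+hi: chosen = lo; break`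
def scanB (d : Int) (chosen : Int) : List (Int × Int) → Int
  | [] => chosen
  | (lo, hi) :: rest => if d ≤ lo + hi then lo else scanB d chosen rest

def mapOneB (f : Int) : Int :=
  let chosen := (PySem.List.pyGet? nomFreqB (-1)).getD 0   -- nomFreq[-1], never raises (nonempty constant)
  scanB (2 * f) chosen (nomFreqB.zip (PySem.List.slice nomFreqB (some 1) none))

def rawToNominal_alt (freq : List Int) : List Int :=
  freq.foldl (fun acc f => acc ++ [mapOneB f]) []

-- ===== PRECONDITION & SPEC =====
def Spec_rawToNominal (freq : List Int) (out : List Int) : Prop := out = rawToNominal_alt freq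
instance (freq : List Int) (out : List Int) : Decidable (Spec_rawToNominal freq out) := by unfold Spec_rawToNominal; infer_instance

-- ===== CLAIM (what is proved, stated in full; the proofs are below) =====
def Claim_equal_rawToNominal : Prop := ∀ (freq : List Int), Dom_rawToNominal freq → Spec_rawToNominal freq (rawToNominal freq)

-- ===== LEMMAS AND PROOFS =====

-- A's loop body, generalized over the nominal list (same computation as mapOneA)
def genA (f : Int) (ns : List Int) : Int :=
  let distance := ns.map (fun i => (f - i) ^ 2)
  match PySem.List.min? distance (fun y => y) with
  | none => 0
  | some m =>
    match PySem.List.index? distance m with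
    | none => 0
    | some k => (PySem.List.pyGet? ns (k : Int)).getD 0

-- B's scan, generalized: walk adjacent pairs, default = last element
def genB (f : Int) : List Int → Int
  | [] => 0
  | [x] => x
  | x :: y :: rest => if 2 * f ≤ x + y then x else genB f (y :: rest)

theorem foldl_min_eq_left {a : Int} {l : List Int} (h : ∀ b ∈ l, a ≤ b) :
    l.foldl min a = a := by
  induction l with
  | nil => rfl
  | cons c l ih =>
    simp only [List.foldl_cons, min_eq_left (h c (by simp))]
    exact ih (fun b hb => h b (by simp [hb]))

theorem genA_eq_genB (f : Int) :
    ∀ ns : List Int, ns.Pairwise (· < ·) → ns ≠ [] → genA f ns = genB f ns := by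
  intro ns
  induction ns with
  | nil => intro _ h; exact absurd rfl h
  | cons x tl ih =>
    intro hpw _
    cases tl with
    | nil =>
      simp [genA, genB, PySem.List.min?, PySem.List.index?, PySem.List.pyGet?, PySem.List.pyIdx?]
    | cons y rest =>
      have hxy : x < y := (List.pairwise_cons.mp hpw).1 y (by simp)
      by_cases hc : 2 * f ≤ x + y
      · -- head wins: its distance is ≤ every later distance, so it is the first minimum
        have hle : ∀ z ∈ y :: rest, (f - x) ^ 2 ≤ (f - z) ^ 2 := by
          intro z hz
          have hyz : y ≤ z := by
            rcases List.mem_cons.mp hz with rfl | hz'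
            · exact le_refl _
            · exact le_of_lt ((List.pairwise_cons.mp (List.pairwise_cons.mp hpw).2).1 z hz')
          nlinarith
        have hmin : PySem.List.min?
            ((x :: y :: rest).map (fun i => (f - i) ^ 2)) (fun y => y) = some ((f - x) ^ 2) := by
          rw [List.map_cons, PySem.List.min?_id_cons, foldl_min_eq_left]
          intro b hb
          obtain ⟨z, hz, rfl⟩ := List.mem_map.mp hb
          exact hle z hz
        have hidx0 : PySem.List.index?
            ((x :: y :: rest).map (fun i => (f - i) ^ 2)) ((f - x) ^ 2) = some 0 := by
          rw [List.map_cons]; exact PySem.List.index?_cons_self _ _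
        simp only [genA, hmin, hidx0, genB, if_pos hc]
        simp [PySem.List.pyGet?, PySem.List.pyIdx?,
          show (0:Int) ≤ (rest.length : Int) + 1 from by positivity]
      · -- head loses strictly to the next distance: first minimum lives in the tail
        have hstrict : (f - y) ^ 2 < (f - x) ^ 2 := by nlinarith
        have hm : PySem.List.min? ((y :: rest).map (fun i => (f - i) ^ 2)) (fun y => y) =
            some ((rest.map (fun i => (f - i) ^ 2)).foldl min ((f - y) ^ 2)) := by
          rw [List.map_cons, PySem.List.min?_id_cons]
        set m : Int := (rest.map (fun i => (f - i) ^ 2)).foldl min ((f - y) ^ 2) with hmdef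
        have hmmem : m ∈ (y :: rest).map (fun i => (f - i) ^ 2) := PySem.List.min?_mem hm
        have hmle : m ≤ (f - y) ^ 2 := PySem.List.min?_isMin hm _ (by simp)
        have hmlt : m < (f - x) ^ 2 := lt_of_le_of_lt hmle hstrict
        have hminall : PySem.List.min?
            ((x :: y :: rest).map (fun i => (f - i) ^ 2)) (fun y => y) = some m := by
          rw [List.map_cons, PySem.List.min?_id_cons, List.map_cons, List.foldl_cons,
            min_eq_right hstrict.le]
        obtain ⟨k, hk⟩ : ∃ k, PySem.List.index?
            ((y :: rest).map (fun i => (f - i) ^ 2)) m = some k := by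
          have hne : PySem.List.index? ((y :: rest).map (fun i => (f - i) ^ 2)) m ≠ none := by
            rw [Ne, PySem.List.index?_eq_none_iff]
            exact fun h => h hmmem
          exact Option.ne_none_iff_exists'.mp hne
        have hidx : PySem.List.index?
            ((x :: y :: rest).map (fun i => (f - i) ^ 2)) m = some (k + 1) := by
          rw [List.map_cons, PySem.List.index?_cons_of_ne _ (ne_of_gt hmlt), hk]
          rfl
        have htail : genA f (y :: rest) = (PySem.List.pyGet? (y :: rest) (k : Int)).getD 0 := by
          simp only [genA, hm, hk]
        have hcast : ((k + 1 : Nat) : Int) = (k : Int) + 1 := by push_cast; ring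
        have hhead : genA f (x :: y :: rest) = (PySem.List.pyGet? (y :: rest) (k : Int)).getD 0 := by
          simp only [genA, hminall, hidx, hcast, PySem.List.pyGet?_cons_succ]
        rw [hhead, ← htail, genB, if_neg hc]
        exact ih (List.pairwise_cons.mp hpw).2 (by simp)

theorem mapOneA_eq (f : Int) : mapOneA f = genA f nomFreqA := rfl

theorem mapOneB_eq (f : Int) : mapOneB f = genB f nomFreqB := by
  simp only [mapOneB, nomFreqB]
  norm_num [scanB, genB, PySem.List.slice, PySem.List.pyGet?, PySem.List.pyIdx?, PySem.List.clampIdx, List.zip]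

-- ===== VERDICT (by name: the statement is the Claim_ definition above) =====
theorem rawToNominal_spec : Claim_equal_rawToNominal := by
  intro freq _
  unfold Spec_rawToNominal rawToNominal rawToNominal_alt
  rw [PySem.List.foldl_append_singleton_eq_map, PySem.List.foldl_append_singleton_eq_map]
  apply List.map_congr_left
  intro f _
  rw [mapOneA_eq, mapOneB_eq]
  have : nomFreqB = nomFreqA := rfl
  rw [this]
  exact genA_eq_genB f nomFreqA (by decide) (by decide)
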